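-- pv_equiv track=rewrite | github.com/Elured-code/traveller-world-gen | traveller_map_fetch.py | parse_stellar_string
-- ===== SOURCE A (Python) =====
-- from typing import List, Optional, Tuple
--
-- _VALID_LUM_CLASSES = {"Ia", "Ib", "II", "III", "IV", "V", "VI"}
--
-- def parse_stellar_string(
--     stars_str: str,
-- ) -> List[Tuple[str, Optional[int], str]]:
--     """
--     Parse a TravellerMap stellar classification string into a list of
--     (spectral_type, subtype, lum_class) tuples.
--
--     Handles main-sequence stars ('G2 V'), white dwarfs ('D'), brown dwarfs
--     ('BD'), and all luminosity classes (Ia, Ib, II–VI).  Always returns at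
--     least one entry, defaulting to G2 V on parse failure.
--
--     Examples
--     --------
--     'G2 V'          → [('G', 2, 'V')]
--     'G2 V M7 V'     → [('G', 2, 'V'), ('M', 7, 'V')]
--     'K3 IV D'       → [('K', 3, 'IV'), ('D', None, 'D')]
--     'BD'            → [('BD', None, 'BD')]
--     'M0 V M5 VI D'  → [('M', 0, 'V'), ('M', 5, 'VI'), ('D', None, 'D')]
--     """
--     tokens  = stars_str.strip().split()
--     results: List[Tuple[str, Optional[int], str]] = []
--     i = 0
--     while i < len(tokens):
--         tok = tokens[i]
--         if tok == "BD":
--             results.append(("BD", None, "BD"))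
--             i += 1
--         elif tok == "D":
--             results.append(("D", None, "D"))
--             i += 1
--         elif (len(tok) >= 2
--               and tok[0] in "OBAFGKM"
--               and tok[1].isdigit()):
--             spectral = tok[0]
--             subtype  = int(tok[1])
--             if (i + 1 < len(tokens)
--                     and tokens[i + 1] in _VALID_LUM_CLASSES):
--                 lum_class = tokens[i + 1]
--                 i += 2
--             else:
--                 lum_class = "V"
--                 i += 1
--             results.append((spectral, subtype, lum_class))
--         else:
--             i += 1
--
--     return results if results else [("G", 2, "V")]
-- ===== SOURCE B (Python) =====
-- _VALID_LUM_CLASSES = {"Ia", "Ib", "II", "III", "IV", "V", "VI"}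
--
-- def parse_stellar_string(stars_str):
--     """Streaming state machine: keep one pending (spectral, subtype) star;
--     a luminosity-class token attaches only if it immediately follows it."""
--     results = []
--     pending = None  # (spectral, subtype) awaiting its luminosity class
--     for tok in stars_str.split():
--         if pending is not None and tok in _VALID_LUM_CLASSES:
--             results.append((pending[0], pending[1], tok))
--             pending = None
--             continue
--         if pending is not None:
--             results.append((pending[0], pending[1], "V"))
--             pending = None
--         if tok == "BD":
--             results.append(("BD", None, "BD"))
--         elif tok == "D":
--             results.append(("D", None, "D"))
--         elif len(tok) >= 2 and tok[0] in "OBAFGKM" and tok[1].isdigit():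
--             pending = (tok[0], int(tok[1]))
--     if pending is not None:
--         results.append((pending[0], pending[1], "V"))
--     return results or [("G", 2, "V")]
-- ===== Notes on version B (the rewrite author's own statement) =====
-- stated objective: alternative
-- what changed: Replaces A's index-based while loop with tokens[i+1] lookahead and i+=2 stepping by a single forward for-loop streaming state machine that carries one pending (spectral, subtype) star and attaches a luminosity-class token to it or flushes it with the default main-sequence luminosity class.
import Mathlib
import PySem

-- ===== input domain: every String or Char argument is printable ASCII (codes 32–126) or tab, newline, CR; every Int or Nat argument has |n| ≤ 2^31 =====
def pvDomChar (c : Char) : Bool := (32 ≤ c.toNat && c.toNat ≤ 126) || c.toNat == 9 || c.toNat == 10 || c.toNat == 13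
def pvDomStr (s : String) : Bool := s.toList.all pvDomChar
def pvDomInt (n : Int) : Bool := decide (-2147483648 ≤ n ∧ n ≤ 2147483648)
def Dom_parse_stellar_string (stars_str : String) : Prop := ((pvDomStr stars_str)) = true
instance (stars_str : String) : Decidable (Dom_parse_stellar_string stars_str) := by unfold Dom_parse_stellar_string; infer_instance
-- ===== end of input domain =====

-- B replaces A's index-and-lookahead while loop by a single-pass streaming state
-- machine carrying one pending (spectral, subtype) star (objective: alternative).

-- ===== PORT A =====
-- A's `tokens[i+1] in _VALID_LUM_CLASSES` membership test
def pvLumA (tok : String) : Bool := ["Ia", "Ib", "II", "III", "IV", "V", "VI"].contains tok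

-- A's guard `tok[0] in "OBAFGKM" and tok[1].isdigit()` on the first two chars
-- (exact on the ASCII domain, where str.isdigit on one char is Char.isDigit)
def pvSpecA (c0 c1 : Char) : Bool := "OBAFGKM".toList.contains c0 && c1.isDigit

-- A's while loop over `tokens` with index i and lookahead tokens[i+1]:
-- the list argument is the suffix `tokens[i:]`; `i += 2` drops two tokens;
-- `len(tok) >= 2` is the c0 :: c1 :: _ match; `int(tok[1])` of an ASCII digit is toNat - 48.
def pvLoopA (results : List (String × Option Int × String)) :
    List String → List (String × Option Int × String)
  | [] => results
  | tok :: rest =>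
    if tok = "BD" then pvLoopA (results ++ [("BD", none, "BD")]) rest
    else if tok = "D" then pvLoopA (results ++ [("D", none, "D")]) rest
    else match tok.toList with
      | c0 :: c1 :: _ =>
        if pvSpecA c0 c1 then
          let spectral := String.ofList [c0]
          let subtype : Int := (c1.toNat : Int) - 48
          match rest with
          | next :: rest' =>
            if pvLumA next then pvLoopA (results ++ [(spectral, some subtype, next)]) rest'
            else pvLoopA (results ++ [(spectral, some subtype, "V")]) (next :: rest')
          | [] => pvLoopA (results ++ [(spectral, some subtype, "V")]) []
        else pvLoopA results rest
      | _ => pvLoopA results rest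

def parse_stellar_string (stars_str : String) : List (String × Option Int × String) :=
  let tokens := PySem.Str.split₀ (PySem.Str.strip stars_str)
  let results := pvLoopA [] tokens
  if results = [] then [("G", some 2, "V")] else results

-- ===== PORT B =====
-- B's `tok in _VALID_LUM_CLASSES` membership test
def pvLumB (tok : String) : Bool := ["Ia", "Ib", "II", "III", "IV", "V", "VI"].contains tok

-- B's guard `tok[0] in "OBAFGKM" and tok[1].isdigit()` (exact on the ASCII domain)
def pvSpecB (c0 c1 : Char) : Bool := "OBAFGKM".toList.contains c0 && c1.isDigit

-- B's classification of a token when no star is pending: returns (new pending, results)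
def pvClassifyB (results : List (String × Option Int × String)) (tok : String) :
    Option (String × Int) × List (String × Option Int × String) :=
  if tok = "BD" then (none, results ++ [("BD", none, "BD")])
  else if tok = "D" then (none, results ++ [("D", none, "D")])
  else match tok.toList with
    | c0 :: c1 :: _ =>
      if pvSpecB c0 c1 then (some (String.ofList [c0], (c1.toNat : Int) - 48), results)
      else (none, results)
    | _ => (none, results)

-- one iteration of B's for-loop: state = (pending star, results so far)
def pvStepB (st : Option (String × Int) × List (String × Option Int × String)) (tok : String) :
    Option (String × Int) × List (String × Option Int × String) :=
  match st with
  | (some (s, n), results) =>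
    if pvLumB tok then (none, results ++ [(s, some n, tok)])
    else pvClassifyB (results ++ [(s, some n, "V")]) tok
  | (none, results) => pvClassifyB results tok

-- B's trailing `if pending is not None: ...` flush
def pvFinishB (st : Option (String × Int) × List (String × Option Int × String)) :
    List (String × Option Int × String) :=
  match st.1 with
  | some (s, n) => st.2 ++ [(s, some n, "V")]
  | none => st.2

def parse_stellar_string_alt (stars_str : String) : List (String × Option Int × String) :=
  let results := pvFinishB ((PySem.Str.split₀ (PySem.Str.strip stars_str)).foldl pvStepB (none, []))
  if results = [] then [("G", some 2, "V")] else results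

-- ===== PRECONDITION & SPEC =====
def Spec_parse_stellar_string (stars_str : String) (out : List (String × Option Int × String)) : Prop := out = parse_stellar_string_alt stars_str
instance (stars_str : String) (out : List (String × Option Int × String)) : Decidable (Spec_parse_stellar_string stars_str out) := by unfold Spec_parse_stellar_string; infer_instance

-- ===== CLAIM (what is proved, stated in full; the proofs are below) =====
def Claim_equal_parse_stellar_string : Prop := ∀ (stars_str : String), Dom_parse_stellar_string stars_str → Spec_parse_stellar_string stars_str (parse_stellar_string stars_str)

-- ===== LEMMAS AND PROOFS =====

-- characterisation of the star list produced from a token list (no pending star)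
def pvHn : List String → List (String × Option Int × String)
  | [] => []
  | tok :: rest =>
    if tok = "BD" then ("BD", none, "BD") :: pvHn rest
    else if tok = "D" then ("D", none, "D") :: pvHn rest
    else match tok.toList with
      | c0 :: c1 :: _ =>
        if pvSpecA c0 c1 then
          match rest with
          | next :: rest' =>
            if pvLumA next then (String.ofList [c0], some ((c1.toNat : Int) - 48), next) :: pvHn rest'
            else (String.ofList [c0], some ((c1.toNat : Int) - 48), "V") :: pvHn (next :: rest')
          | [] => [(String.ofList [c0], some ((c1.toNat : Int) - 48), "V")]
        else pvHn rest
      | _ => pvHn rest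


-- one unfolding step of pvHn at a spectral token not followed by a luminosity class
-- (stated separately because unfolding pvHn at (next :: rest') would loop simp)
theorem pvHn_spec_nonlum (tok next : String) (rest' : List String) (c0 c1 : Char) (tl : List Char)
    (hbd : ¬tok = "BD") (hd : ¬tok = "D") (hl : tok.toList = c0 :: c1 :: tl)
    (hs : pvSpecA c0 c1 = true) (hlum : ¬pvLumA next = true) :
    pvHn (tok :: next :: rest')
      = (String.ofList [c0], some ((c1.toNat : Int) - 48), "V") :: pvHn (next :: rest') := by
  conv_lhs => rw [pvHn.eq_def]
  simp [hbd, hd, hl, hs, hlum]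

theorem pvLoopA_eq (tokens : List String) (results : List (String × Option Int × String)) :
    pvLoopA results tokens = results ++ pvHn tokens := by
  induction tokens using pvHn.induct generalizing results with
  | case1 => simp [pvLoopA, pvHn]
  | case2 rest ih => simp [pvLoopA, pvHn, ih]
  | case3 rest h ih => simp [pvLoopA, pvHn, ih]
  | case4 tok hbd hd c0 c1 tl hl hs next rest' hlum ih =>
      simp [pvLoopA, pvHn, hbd, hd, hl, hs, hlum, ih]
  | case5 tok hbd hd c0 c1 tl hl hs next rest' hlum ih =>
      rw [pvHn_spec_nonlum tok next rest' c0 c1 tl hbd hd hl hs hlum]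
      conv_lhs => rw [pvLoopA.eq_def]
      simp [hbd, hd, hl, hs, hlum, ih]
  | case6 tok hbd hd c0 c1 tl hl hs =>
      simp [pvLoopA, pvHn, hbd, hd, hl, hs]
  | case7 tok rest hbd hd c0 c1 tl hl hs ih =>
      simp [pvLoopA, pvHn, hbd, hd, hl, hs, ih]
  | case8 tok rest hbd hd hl ih =>
      have hl' : tok.toList = [] ∨ ∃ c, tok.toList = [c] := by
        rcases h : tok.toList with _ | ⟨c, _ | ⟨c', t⟩⟩
        · exact Or.inl rfl
        · exact Or.inr ⟨c, rfl⟩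
        · exact absurd h (fun h => hl _ _ _ h)
      rcases hl' with h | ⟨c, h⟩ <;> simp [pvLoopA, pvHn, hbd, hd, h, ih]

theorem pvFoldB_none (tokens : List String) (results : List (String × Option Int × String)) :
    pvFinishB (tokens.foldl pvStepB (none, results)) = results ++ pvHn tokens := by
  induction tokens using pvHn.induct generalizing results with
  | case1 => simp [pvFinishB, pvHn]
  | case2 rest ih => simp [pvStepB, pvClassifyB, pvHn, ih]
  | case3 rest h ih => simp [pvStepB, pvClassifyB, pvHn, ih]
  | case4 tok hbd hd c0 c1 tl hl hs next rest' hlum ih =>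
      have hsB : pvSpecB c0 c1 = true := hs
      have hlb : pvLumB next = true := hlum
      simp [pvStepB, pvClassifyB, pvHn, hbd, hd, hl, hs, hsB, hlum, hlb, ih]
  | case5 tok hbd hd c0 c1 tl hl hs next rest' hlum ih =>
      have hsB : pvSpecB c0 c1 = true := hs
      have hlb : pvLumB next = false := by
        have : pvLumA next = false := by simpa using hlum
        exact this
      have step1 : List.foldl pvStepB (none, results) (tok :: next :: rest')
          = List.foldl pvStepB (some (String.ofList [c0], (c1.toNat : Int) - 48), results) (next :: rest') := by
        simp [List.foldl_cons, pvStepB, pvClassifyB, hbd, hd, hl, hsB]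
      have key : List.foldl pvStepB (some (String.ofList [c0], (c1.toNat : Int) - 48), results) (next :: rest')
          = List.foldl pvStepB (none, results ++ [(String.ofList [c0], some ((c1.toNat : Int) - 48), "V")]) (next :: rest') := by
        simp [List.foldl_cons, pvStepB, hlb]
      rw [step1, key, ih, pvHn_spec_nonlum tok next rest' c0 c1 tl hbd hd hl hs hlum]
      simp
  | case6 tok hbd hd c0 c1 tl hl hs =>
      have hsB : pvSpecB c0 c1 = true := hs
      simp [pvStepB, pvClassifyB, pvFinishB, pvHn, hbd, hd, hl, hs, hsB]
  | case7 tok rest hbd hd c0 c1 tl hl hs ih =>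
      have hsB : pvSpecB c0 c1 = false := by simpa using hs
      simp [pvStepB, pvClassifyB, pvHn, hbd, hd, hl, hs, hsB, ih]
  | case8 tok rest hbd hd hl ih =>
      have hl' : tok.toList = [] ∨ ∃ c, tok.toList = [c] := by
        rcases h : tok.toList with _ | ⟨c, _ | ⟨c', t⟩⟩
        · exact Or.inl rfl
        · exact Or.inr ⟨c, rfl⟩
        · exact absurd h (fun h => hl _ _ _ h)
      rcases hl' with h | ⟨c, h⟩ <;> simp [pvStepB, pvClassifyB, pvHn, hbd, hd, h, ih]

-- ===== VERDICT (by name: the statement is the Claim_ definition above) =====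
theorem parse_stellar_string_spec : Claim_equal_parse_stellar_string := by
  intro stars_str _
  have h : pvLoopA [] (PySem.Str.split₀ (PySem.Str.strip stars_str))
      = pvFinishB ((PySem.Str.split₀ (PySem.Str.strip stars_str)).foldl pvStepB (none, [])) := by
    rw [pvLoopA_eq, pvFoldB_none, List.nil_append]
  show (if pvLoopA [] (PySem.Str.split₀ (PySem.Str.strip stars_str)) = [] then [("G", some 2, "V")]
        else pvLoopA [] (PySem.Str.split₀ (PySem.Str.strip stars_str)))
      = (if pvFinishB ((PySem.Str.split₀ (PySem.Str.strip stars_str)).foldl pvStepB (none, [])) = []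
           then [("G", some 2, "V")]
         else pvFinishB ((PySem.Str.split₀ (PySem.Str.strip stars_str)).foldl pvStepB (none, [])))
  rw [h]
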